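-- pv_equiv track=rewrite | github.com/Phytoritas/stomatal-optimiaztion | src/stomatal_optimiaztion/domains/tomato/tomics/alloc/validation/datasets/contracts.py | derive_ingestion_status
-- ===== SOURCE A (Python) =====
-- from enum import Enum
--
-- class DatasetCapability(str, Enum):
--     MEASURED_HARVEST = "measured_harvest"
--     HARVEST_PROXY = "harvest_proxy"
--     CONTEXT_ONLY = "context_only"
--
-- class DatasetIngestionStatus(str, Enum):
--     RUNNABLE = "runnable"
--     DRAFT_NEEDS_RAW_FIXTURE = "draft_needs_raw_fixture"
--     DRAFT_NEEDS_BASIS_METADATA = "draft_needs_basis_metadata"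
--     DRAFT_NEEDS_HARVEST_MAPPING = "draft_needs_harvest_mapping"
--     DRAFT_BLOCKED = "draft_blocked"
--
-- RAW_FIXTURE_BLOCKER_CODES = frozenset(
--     {
--         "missing_raw_fixture",
--         "missing_forcing_path",
--         "missing_observed_harvest_path",
--         "missing_sanitized_fixture",
--     }
-- )
--
-- BASIS_BLOCKER_CODES = frozenset({"missing_reporting_basis", "missing_plants_per_m2"})
--
-- HARVEST_MAPPING_BLOCKER_CODES = frozenset(
--     {
--         "missing_validation_window",
--         "missing_date_column",
--         "missing_measured_cumulative_column",
--         "ambiguous_harvest_semantics",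
--         "review_only_dry_matter_conversion",
--     }
-- )
--
-- def derive_ingestion_status(
--     capability: DatasetCapability | str,
--     blocker_codes: list[str] | tuple[str, ...],
-- ) -> DatasetIngestionStatus:
--     del capability
--     blocker_set = {str(code) for code in blocker_codes if str(code).strip()}
--     if not blocker_set:
--         return DatasetIngestionStatus.RUNNABLE
--     if blocker_set & RAW_FIXTURE_BLOCKER_CODES:
--         return DatasetIngestionStatus.DRAFT_NEEDS_RAW_FIXTURE
--     if blocker_set & BASIS_BLOCKER_CODES:
--         return DatasetIngestionStatus.DRAFT_NEEDS_BASIS_METADATA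
--     if blocker_set & HARVEST_MAPPING_BLOCKER_CODES:
--         return DatasetIngestionStatus.DRAFT_NEEDS_HARVEST_MAPPING
--     return DatasetIngestionStatus.DRAFT_BLOCKED
-- ===== SOURCE B (Python) =====
-- from enum import Enum
--
--
-- class DatasetCapability(str, Enum):
--     MEASURED_HARVEST = "measured_harvest"
--     HARVEST_PROXY = "harvest_proxy"
--     CONTEXT_ONLY = "context_only"
--
--
-- class DatasetIngestionStatus(str, Enum):
--     RUNNABLE = "runnable"
--     DRAFT_NEEDS_RAW_FIXTURE = "draft_needs_raw_fixture"
--     DRAFT_NEEDS_BASIS_METADATA = "draft_needs_basis_metadata"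
--     DRAFT_NEEDS_HARVEST_MAPPING = "draft_needs_harvest_mapping"
--     DRAFT_BLOCKED = "draft_blocked"
--
--
-- # one combined table: blocker code -> priority (0 strongest)
-- _PRIORITY = {}
-- for _code in ("missing_raw_fixture", "missing_forcing_path",
--               "missing_observed_harvest_path", "missing_sanitized_fixture"):
--     _PRIORITY[_code] = 0
-- for _code in ("missing_reporting_basis", "missing_plants_per_m2"):
--     _PRIORITY[_code] = 1
-- for _code in ("missing_validation_window", "missing_date_column",
--               "missing_measured_cumulative_column", "ambiguous_harvest_semantics",
--               "review_only_dry_matter_conversion"):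
--     _PRIORITY[_code] = 2
--
-- _STATUS_BY_PRIORITY = (
--     DatasetIngestionStatus.DRAFT_NEEDS_RAW_FIXTURE,
--     DatasetIngestionStatus.DRAFT_NEEDS_BASIS_METADATA,
--     DatasetIngestionStatus.DRAFT_NEEDS_HARVEST_MAPPING,
--     DatasetIngestionStatus.DRAFT_BLOCKED,
-- )
--
--
-- def derive_ingestion_status(capability, blocker_codes):
--     del capability
--     best = 3
--     seen = False
--     for code in blocker_codes:
--         c = str(code)
--         if not c.strip():
--             continue
--         seen = True
--         best = min(best, _PRIORITY.get(c, 3))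
--     if not seen:
--         return DatasetIngestionStatus.RUNNABLE
--     return _STATUS_BY_PRIORITY[best]
-- ===== Notes on version B (the rewrite author's own statement) =====
-- stated objective: simpler
-- what changed: Replaces the set construction plus three ordered set-intersection tests with one combined code->priority table and a single pass keeping the minimum priority seen.
import Mathlib
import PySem

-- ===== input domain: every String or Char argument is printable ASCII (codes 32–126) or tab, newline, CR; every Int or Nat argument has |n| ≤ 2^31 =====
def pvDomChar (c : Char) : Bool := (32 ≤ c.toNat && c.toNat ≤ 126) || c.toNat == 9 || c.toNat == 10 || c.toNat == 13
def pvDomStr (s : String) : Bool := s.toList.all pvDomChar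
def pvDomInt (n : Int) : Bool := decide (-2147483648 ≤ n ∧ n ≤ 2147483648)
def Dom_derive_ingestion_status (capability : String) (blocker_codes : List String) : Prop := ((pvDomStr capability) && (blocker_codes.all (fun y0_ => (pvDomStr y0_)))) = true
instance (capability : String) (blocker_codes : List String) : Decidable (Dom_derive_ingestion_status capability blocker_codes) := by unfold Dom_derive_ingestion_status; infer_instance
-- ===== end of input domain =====

-- B replaces A's set construction and three ordered set-intersection tests by a single
-- combined code->priority table and one pass keeping the minimum priority seen (objective: simpler).

-- ===== PORT A =====
def pvRawCodes : List String :=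
  ["missing_raw_fixture", "missing_forcing_path", "missing_observed_harvest_path", "missing_sanitized_fixture"]
def pvBasisCodes : List String :=
  ["missing_reporting_basis", "missing_plants_per_m2"]
def pvHarvestCodes : List String :=
  ["missing_validation_window", "missing_date_column", "missing_measured_cumulative_column",
   "ambiguous_harvest_semantics", "review_only_dry_matter_conversion"]

def derive_ingestion_status (capability : String) (blocker_codes : List String) : String :=
  let blocker_set : PySem.Set String :=
    PySem.Set.ofList (blocker_codes.filter (fun code => PySem.Str.strip code ≠ ""))
  if blocker_set = [] then "runnable"
  else if PySem.Set.inter blocker_set pvRawCodes ≠ [] then "draft_needs_raw_fixture"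
  else if PySem.Set.inter blocker_set pvBasisCodes ≠ [] then "draft_needs_basis_metadata"
  else if PySem.Set.inter blocker_set pvHarvestCodes ≠ [] then "draft_needs_harvest_mapping"
  else "draft_blocked"

-- ===== PORT B =====
-- Source B's combined code -> priority dict (built there by straight-line assignments)
def pvPriorityTable : PySem.Dict String Nat :=
  PySem.Dict.mk
    [("missing_raw_fixture", 0), ("missing_forcing_path", 0),
     ("missing_observed_harvest_path", 0), ("missing_sanitized_fixture", 0),
     ("missing_reporting_basis", 1), ("missing_plants_per_m2", 1),
     ("missing_validation_window", 2), ("missing_date_column", 2),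
     ("missing_measured_cumulative_column", 2), ("ambiguous_harvest_semantics", 2),
     ("review_only_dry_matter_conversion", 2)]

def pvStatusByPriority : List String :=
  ["draft_needs_raw_fixture", "draft_needs_basis_metadata", "draft_needs_harvest_mapping", "draft_blocked"]

def derive_ingestion_status_alt (capability : String) (blocker_codes : List String) : String :=
  let r : Nat × Bool :=
    blocker_codes.foldl
      (fun st code =>
        if PySem.Str.strip code = "" then st
        else (min st.1 (PySem.Dict.getD pvPriorityTable code 3), true))
      (3, false)
  if r.2 = false then "runnable"
  else pvStatusByPriority.getD r.1 ""

-- ===== PRECONDITION & SPEC =====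
def Spec_derive_ingestion_status (capability : String) (blocker_codes : List String) (out : String) : Prop := out = derive_ingestion_status_alt capability blocker_codes
instance (capability : String) (blocker_codes : List String) (out : String) : Decidable (Spec_derive_ingestion_status capability blocker_codes out) := by unfold Spec_derive_ingestion_status; infer_instance

-- ===== CLAIM (what is proved, stated in full; the proofs are below) =====
def Claim_equal_derive_ingestion_status : Prop := ∀ (capability : String) (blocker_codes : List String), Dom_derive_ingestion_status capability blocker_codes → Spec_derive_ingestion_status capability blocker_codes (derive_ingestion_status capability blocker_codes)

-- ===== LEMMAS AND PROOFS =====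

-- A's branch-chain value, on the filtered list, as a priority in {0,1,2,3}
def pvChain (L : List String) : Nat :=
  if L.any (fun c => pvRawCodes.contains c) then 0
  else if L.any (fun c => pvBasisCodes.contains c) then 1
  else if L.any (fun c => pvHarvestCodes.contains c) then 2
  else 3

-- B's table lookup expressed through A's three code lists
theorem pvPrio_eq (c : String) :
    PySem.Dict.getD pvPriorityTable c 3 =
      (if pvRawCodes.contains c then 0
       else if pvBasisCodes.contains c then 1
       else if pvHarvestCodes.contains c then 2 else 3) := by
  simp only [pvPriorityTable, pvRawCodes, pvBasisCodes, pvHarvestCodes,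
    PySem.Dict.getD, PySem.Dict.get?_mk_cons, List.contains_cons, List.contains_nil]
  by_cases h0 : c = "missing_raw_fixture"
  · simp [h0]
  by_cases h1 : c = "missing_forcing_path"
  · simp [h0, h1]
  by_cases h2 : c = "missing_observed_harvest_path"
  · simp [h0, h1, h2]
  by_cases h3 : c = "missing_sanitized_fixture"
  · simp [h0, h1, h2, h3]
  by_cases h4 : c = "missing_reporting_basis"
  · simp [h0, h1, h2, h3, h4]
  by_cases h5 : c = "missing_plants_per_m2"
  · simp [h0, h1, h2, h3, h4, h5]
  by_cases h6 : c = "missing_validation_window"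
  · simp [h0, h1, h2, h3, h4, h5, h6]
  by_cases h7 : c = "missing_date_column"
  · simp [h0, h1, h2, h3, h4, h5, h6, h7]
  by_cases h8 : c = "missing_measured_cumulative_column"
  · simp [h0, h1, h2, h3, h4, h5, h6, h7, h8]
  by_cases h9 : c = "ambiguous_harvest_semantics"
  · simp [h0, h1, h2, h3, h4, h5, h6, h7, h8, h9]
  by_cases h10 : c = "review_only_dry_matter_conversion"
  · simp [h0, h1, h2, h3, h4, h5, h6, h7, h8, h9, h10]
  simp [h0, h1, h2, h3, h4, h5, h6, h7, h8, h9, h10,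
    Ne.symm h0, Ne.symm h1, Ne.symm h2, Ne.symm h3, Ne.symm h4, Ne.symm h5,
    Ne.symm h6, Ne.symm h7, Ne.symm h8, Ne.symm h9, Ne.symm h10, PySem.Dict.get?]

theorem pvChain_cons (c : String) (L : List String) :
    pvChain (c :: L) = min (PySem.Dict.getD pvPriorityTable c 3) (pvChain L) := by
  rw [pvPrio_eq]
  unfold pvChain
  simp only [List.any_cons, Bool.or_eq_true]
  rcases Bool.eq_false_or_eq_true (pvRawCodes.contains c) with h1 | h1 <;>
    rcases Bool.eq_false_or_eq_true (pvBasisCodes.contains c) with h2 | h2 <;>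
      rcases Bool.eq_false_or_eq_true (pvHarvestCodes.contains c) with h3 | h3 <;>
        simp only [h1, h2, h3, Bool.false_eq_true, Bool.true_eq_false, eq_self_iff_true,
          true_or, false_or, or_false, or_true, if_true, if_false] <;>
        split_ifs <;> omega

theorem pvFoldMin (L : List String) (a : Nat) (ha : a ≤ 3) :
    L.foldl (fun m c => min m (PySem.Dict.getD pvPriorityTable c 3)) a = min a (pvChain L) := by
  induction L generalizing a with
  | nil => simp [pvChain, Nat.min_eq_left ha]
  | cons c L ih =>
      rw [List.foldl_cons, ih _ (le_trans (Nat.min_le_left _ _) ha), pvChain_cons, Nat.min_assoc]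

-- B's skipping fold over blocker_codes = the plain fold over A's filtered list, with the seen flag
theorem pvFoldFilter (bc : List String) (st : Nat × Bool) :
    bc.foldl
      (fun st code =>
        if PySem.Str.strip code = "" then st
        else (min st.1 (PySem.Dict.getD pvPriorityTable code 3), true)) st =
    ((bc.filter (fun code => PySem.Str.strip code ≠ "")).foldl
      (fun m c => min m (PySem.Dict.getD pvPriorityTable c 3)) st.1,
     st.2 || !(bc.filter (fun code => PySem.Str.strip code ≠ "")).isEmpty) := by
  induction bc generalizing st with
  | nil => simp
  | cons c bc ih =>
      by_cases h : PySem.Str.strip c = "" <;> simp [h, ih, List.filter_cons]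

theorem pvOfList_eq_nil_iff (L : List String) : PySem.Set.ofList L = [] ↔ L = [] := by
  constructor
  · intro h
    cases L with
    | nil => rfl
    | cons c L =>
        exfalso
        have : c ∈ PySem.Set.ofList (c :: L) := by
          rw [PySem.Set.mem_ofList]; exact List.mem_cons_self
        rw [h] at this; exact List.not_mem_nil this
  · intro h; subst h; rfl

theorem pvInter_ne_nil (L : List String) (t : List String) :
    (PySem.Set.inter (PySem.Set.ofList L) t ≠ []) ↔ (L.any (fun c => t.contains c) = true) := by
  simp only [PySem.Set.inter, ne_eq, List.filter_eq_nil_iff, List.any_eq_true]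
  constructor
  · intro h
    push_neg at h
    obtain ⟨x, hx, ht⟩ := h
    exact ⟨x, (PySem.Set.mem_ofList _ _).1 hx, ht⟩
  · rintro ⟨x, hx, ht⟩ h
    exact absurd ht (by simpa using h x ((PySem.Set.mem_ofList _ _).2 hx))

-- ===== VERDICT (by name: the statement is the Claim_ definition above) =====
theorem derive_ingestion_status_spec : Claim_equal_derive_ingestion_status := by
  intro capability bc _
  unfold Spec_derive_ingestion_status derive_ingestion_status derive_ingestion_status_alt
  simp only [pvFoldFilter]
  set L := bc.filter (fun code => PySem.Str.strip code ≠ "") with hL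
  by_cases hnil : L = []
  · rw [hnil]; rfl
  · have hne : L.isEmpty = false := by simpa [List.isEmpty_iff] using hnil
    have h0 : ¬ (PySem.Set.ofList L = []) := fun h => hnil ((pvOfList_eq_nil_iff L).1 h)
    rw [pvFoldMin L 3 le_rfl, if_neg h0]
    simp only [hne, Bool.not_false, Bool.false_or, Bool.true_eq_false, if_false,
      pvInter_ne_nil]
    unfold pvChain
    split_ifs <;> rfl
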